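-- pv_equiv track=rewrite | github.com/Suvitruf/gamedev-links | raw/classify.py | classify_type
-- ===== SOURCE A (Python) =====
-- VIDEO_DOMAINS = {"youtube.com", "youtu.be", "vimeo.com", "twitch.tv"}
--
-- SOCIAL_DOMAINS = {"twitter.com", "x.com", "reddit.com"}
--
-- ARTICLE_DOMAINS = {
--     "80.lv", "habr.com", "dtf.ru", "gamedeveloper.com",
--     "newsletter.gamediscover.co", "kotaku.com", "venturebeat.com",
--     "wccftech.com", "nplus1.ru", "3dnews.ru", "vc.ru",
-- }
--
-- REPO_DOMAINS = {"github.com", "gitlab.com"}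
--
-- STORE_DOMAINS = {
--     "store.steampowered.com", "store.epicgames.com",
--     "assetstore.unity.com", "fab.com", "itch.io", "gumroad.com",
-- }
--
-- def classify_type(domain: str) -> str:
--     # Check exact domain first
--     if domain in VIDEO_DOMAINS:
--         return "video"
--     if domain in SOCIAL_DOMAINS:
--         return "social"
--     if domain in REPO_DOMAINS:
--         return "repository"
--     if domain in STORE_DOMAINS:
--         return "store"
--     if domain in ARTICLE_DOMAINS:
--         return "article"
--
--     # Check if domain ends with any known domain (for subdomains)
--     for d in VIDEO_DOMAINS:
--         if domain.endswith("." + d):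
--             return "video"
--     for d in SOCIAL_DOMAINS:
--         if domain.endswith("." + d):
--             return "social"
--     for d in REPO_DOMAINS:
--         if domain.endswith("." + d):
--             return "repository"
--     for d in STORE_DOMAINS:
--         if domain.endswith("." + d):
--             return "store"
--
--     return "article"
-- ===== SOURCE B (Python) =====
-- _EXACT = {
--     "youtube.com": "video", "youtu.be": "video", "vimeo.com": "video", "twitch.tv": "video",
--     "twitter.com": "social", "x.com": "social", "reddit.com": "social",
--     "github.com": "repository", "gitlab.com": "repository",
--     "store.steampowered.com": "store", "store.epicgames.com": "store",
--     "assetstore.unity.com": "store", "fab.com": "store", "itch.io": "store", "gumroad.com": "store",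
--     "80.lv": "article", "habr.com": "article", "dtf.ru": "article", "gamedeveloper.com": "article",
--     "newsletter.gamediscover.co": "article", "kotaku.com": "article", "venturebeat.com": "article",
--     "wccftech.com": "article", "nplus1.ru": "article", "3dnews.ru": "article", "vc.ru": "article",
-- }
--
-- # Only non-article domains match as suffixes (subdomains of article sites stay "article").
-- _SUFFIX = {d: c for d, c in _EXACT.items() if c != "article"}
--
--
-- def classify_type(domain: str) -> str:
--     cat = _EXACT.get(domain)
--     if cat is not None:
--         return cat
--     # Peel leading labels one at a time and look the remainder up.
--     rest = domain
--     while "." in rest: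
--         rest = rest.split(".", 1)[1]
--         cat = _SUFFIX.get(rest)
--         if cat is not None:
--             return cat
--     return "article"
-- ===== Notes on version B (the rewrite author's own statement) =====
-- stated objective: idiomatic
-- what changed: Replaces A's five hard-coded set-membership chains and four per-set endswith loops by one domain-to-category dict consulted once for the exact match, then a label-peeling loop that looks each progressively shorter dotted suffix up in a non-article suffix dict.
import Mathlib
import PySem

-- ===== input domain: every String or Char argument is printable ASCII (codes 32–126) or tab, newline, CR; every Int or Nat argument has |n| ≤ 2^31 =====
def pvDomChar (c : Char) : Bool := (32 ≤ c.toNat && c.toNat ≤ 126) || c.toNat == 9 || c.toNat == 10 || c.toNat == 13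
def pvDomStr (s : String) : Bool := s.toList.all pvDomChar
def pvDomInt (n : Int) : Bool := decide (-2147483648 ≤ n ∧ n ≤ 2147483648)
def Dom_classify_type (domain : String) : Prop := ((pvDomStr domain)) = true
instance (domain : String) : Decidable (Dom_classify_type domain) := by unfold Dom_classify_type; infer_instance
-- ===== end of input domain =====

-- B replaces A's five hard-coded membership chains and four endswith loops by one
-- domain→category dict plus label-peeling suffix lookups (objective: idiomatic).

-- ===== PORT A =====
def pvVideoA : List String := ["youtube.com", "youtu.be", "vimeo.com", "twitch.tv"]
def pvSocialA : List String := ["twitter.com", "x.com", "reddit.com"]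
def pvArticleA : List String := ["80.lv", "habr.com", "dtf.ru", "gamedeveloper.com",
  "newsletter.gamediscover.co", "kotaku.com", "venturebeat.com",
  "wccftech.com", "nplus1.ru", "3dnews.ru", "vc.ru"]
def pvRepoA : List String := ["github.com", "gitlab.com"]
def pvStoreA : List String := ["store.steampowered.com", "store.epicgames.com",
  "assetstore.unity.com", "fab.com", "itch.io", "gumroad.com"]

-- 'for d in SET: if domain.endswith("." + d): return cat' — at most one member of a set can
-- match (no set element is a dotted suffix of another), so Python's set iteration order is immaterial.
def pvEndsAny (domain : String) (ds : List String) : Bool :=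
  ds.any (fun d => PySem.Str.endswith domain ("." ++ d))

def classify_type (domain : String) : String :=
  if pvVideoA.contains domain then "video"
  else if pvSocialA.contains domain then "social"
  else if pvRepoA.contains domain then "repository"
  else if pvStoreA.contains domain then "store"
  else if pvArticleA.contains domain then "article"
  else if pvEndsAny domain pvVideoA then "video"
  else if pvEndsAny domain pvSocialA then "social"
  else if pvEndsAny domain pvRepoA then "repository"
  else if pvEndsAny domain pvStoreA then "store"
  else "article"

-- ===== PORT B =====
-- Source B's _EXACT dict, in insertion order.
def pvExactB : PySem.Dict String String := PySem.Dict.ofList [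
  ("youtube.com", "video"), ("youtu.be", "video"), ("vimeo.com", "video"), ("twitch.tv", "video"),
  ("twitter.com", "social"), ("x.com", "social"), ("reddit.com", "social"),
  ("github.com", "repository"), ("gitlab.com", "repository"),
  ("store.steampowered.com", "store"), ("store.epicgames.com", "store"),
  ("assetstore.unity.com", "store"), ("fab.com", "store"), ("itch.io", "store"), ("gumroad.com", "store"),
  ("80.lv", "article"), ("habr.com", "article"), ("dtf.ru", "article"), ("gamedeveloper.com", "article"),
  ("newsletter.gamediscover.co", "article"), ("kotaku.com", "article"), ("venturebeat.com", "article"),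
  ("wccftech.com", "article"), ("nplus1.ru", "article"), ("3dnews.ru", "article"), ("vc.ru", "article")]

-- Source B's _SUFFIX = {d: c for d, c in _EXACT.items() if c != "article"}; keys as List Char
-- because the peeling loop below works on the character list of the domain.
def pvSuffixB : PySem.Dict (List Char) String :=
  PySem.Dict.ofList ((pvExactB.items.filter (fun p => !(p.2 == "article"))).map
    (fun p => (p.1.toList, p.2)))

-- Source B's 'while "." in rest: rest = rest.split(".", 1)[1]; …' — rest.split(".",1)[1] is the part
-- after the first dot, so the loop checks, left to right, the remainder after each dot; exact.
def pvPeel : List Char → String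
  | [] => "article"
  | c :: rest =>
    if c = '.' then
      match pvSuffixB.get? rest with
      | some cat => cat
      | none => pvPeel rest
    else pvPeel rest

def classify_type_alt (domain : String) : String :=
  match pvExactB.get? domain with
  | some cat => cat
  | none => pvPeel domain.toList

-- ===== PRECONDITION & SPEC =====
def Spec_classify_type (domain : String) (out : String) : Prop := out = classify_type_alt domain
instance (domain : String) (out : String) : Decidable (Spec_classify_type domain out) := by unfold Spec_classify_type; infer_instance

-- ===== CLAIM (what is proved, stated in full; the proofs are below) =====
def Claim_equal_classify_type : Prop := ∀ (domain : String), Dom_classify_type domain → Spec_classify_type domain (classify_type domain)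

-- ===== LEMMAS AND PROOFS =====

-- every exact key is classified by A as its table category
theorem pvA_on_keys : ∀ p ∈ pvExactB.items, classify_type p.1 = p.2 := by decide

-- no suffix key is a dotted suffix of another suffix key
theorem pvNoNest : ∀ k1 ∈ pvSuffixB.keys, ∀ k2 ∈ pvSuffixB.keys, ¬ ('.' :: k2 <:+ k1) := by decide

theorem pvKeyed_mem_keys {r : List Char} {c : String} (h : pvSuffixB.get? r = some c) :
    r ∈ pvSuffixB.keys := by
  by_contra hm
  rw [(PySem.Dict.get?_eq_none_iff_not_mem_keys pvSuffixB r).mpr hm] at h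
  simp at h

-- uniqueness: at most one dotted suffix of L is a suffix key
theorem pvUniq {L r1 r2 : List Char} {c1 c2 : String}
    (h1 : '.' :: r1 <:+ L) (h2 : '.' :: r2 <:+ L)
    (k1 : pvSuffixB.get? r1 = some c1) (k2 : pvSuffixB.get? r2 = some c2) :
    r1 = r2 ∧ c1 = c2 := by
  have hr : r1 = r2 := by
    rcases List.suffix_or_suffix_of_suffix h1 h2 with h | h
    · rcases List.suffix_cons_iff.mp h with h' | h'
      · simpa using h'
      · exact absurd h' (pvNoNest _ (pvKeyed_mem_keys k2) _ (pvKeyed_mem_keys k1))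
    · rcases List.suffix_cons_iff.mp h with h' | h'
      · simpa using h'.symm
      · exact absurd h' (pvNoNest _ (pvKeyed_mem_keys k1) _ (pvKeyed_mem_keys k2))
  subst hr
  rw [k1] at k2
  exact ⟨rfl, Option.some.inj k2⟩

-- peel returns c when some dotted suffix is a suffix key mapped to c
theorem pvPeel_some : ∀ (L r : List Char) (c : String), '.' :: r <:+ L →
    pvSuffixB.get? r = some c → pvPeel L = c := by
  intro L
  induction L with
  | nil => intro r c h _; exact absurd (List.eq_nil_of_suffix_nil h) (by simp)
  | cons a t ih =>
    intro r c h hk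
    by_cases ha : a = '.'
    · subst ha
      cases hg : pvSuffixB.get? t with
      | some cat =>
        have hpe : pvPeel ('.' :: t) = cat := by simp [pvPeel, hg]
        rw [hpe]
        rcases List.suffix_cons_iff.mp h with h' | h'
        · have hrt : r = t := by simpa using h'
          subst hrt
          rw [hg] at hk; exact Option.some.inj hk
        · exact absurd h' (pvNoNest _ (pvKeyed_mem_keys hg) _ (pvKeyed_mem_keys hk))
      | none =>
        have hpe : pvPeel ('.' :: t) = pvPeel t := by simp [pvPeel, hg]
        rw [hpe]
        rcases List.suffix_cons_iff.mp h with h' | h'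
        · have hrt : r = t := by simpa using h'
          subst hrt
          rw [hg] at hk; simp at hk
        · exact ih r c h' hk
    · simp only [pvPeel, if_neg ha]
      rcases List.suffix_cons_iff.mp h with h' | h'
      · exact absurd (by simpa using h' : '.' = a ∧ r = t).1.symm ha
      · exact ih r c h' hk

-- peel returns "article" when no dotted suffix is a suffix key
theorem pvPeel_none : ∀ (L : List Char), (∀ r c, '.' :: r <:+ L → pvSuffixB.get? r ≠ some c) →
    pvPeel L = "article" := by
  intro L
  induction L with
  | nil => intro _; rfl
  | cons a t ih =>
    intro h
    by_cases ha : a = '.'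
    · subst ha
      cases hg : pvSuffixB.get? t with
      | some cat => exact absurd hg (h t cat (List.suffix_refl _))
      | none =>
        have hpe : pvPeel ('.' :: t) = pvPeel t := by simp [pvPeel, hg]
        rw [hpe]
        exact ih (fun r c hs => h r c (hs.trans (List.suffix_cons _ _)))
    · simp only [pvPeel, if_neg ha]
      exact ih (fun r c hs => h r c (hs.trans (List.suffix_cons _ _)))

-- ends-with-any ↔ existence of a dotted suffix from the list
theorem pvEndsAny_iff (d : String) (ds : List String) :
    pvEndsAny d ds = true ↔ ∃ s ∈ ds, '.' :: s.toList <:+ d.toList := by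
  simp only [pvEndsAny, List.any_eq_true]
  constructor
  · rintro ⟨s, hs, he⟩
    refine ⟨s, hs, ?_⟩
    have := (PySem.Chars.endswith_iff d.toList ("." ++ s).toList).mp (by simpa using he)
    simpa [String.toList_append] using this
  · rintro ⟨s, hs, he⟩
    refine ⟨s, hs, ?_⟩
    have : PySem.Chars.endswith d.toList (("." ++ s).toList) = true :=
      (PySem.Chars.endswith_iff _ _).mpr (by simpa [String.toList_append] using he)
    simpa using this

-- membership in a category list gives the suffix-dict entry
theorem pvVideo_keyed : ∀ s ∈ pvVideoA, pvSuffixB.get? s.toList = some "video" := by decide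
theorem pvSocial_keyed : ∀ s ∈ pvSocialA, pvSuffixB.get? s.toList = some "social" := by decide
theorem pvRepo_keyed : ∀ s ∈ pvRepoA, pvSuffixB.get? s.toList = some "repository" := by decide
theorem pvStore_keyed : ∀ s ∈ pvStoreA, pvSuffixB.get? s.toList = some "store" := by decide

-- every suffix-dict entry comes from one of the four category lists
theorem pvSuffix_cases : ∀ p ∈ pvSuffixB.items,
    (p.2 = "video" ∧ ∃ s ∈ pvVideoA, s.toList = p.1) ∨
    (p.2 = "social" ∧ ∃ s ∈ pvSocialA, s.toList = p.1) ∨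
    (p.2 = "repository" ∧ ∃ s ∈ pvRepoA, s.toList = p.1) ∨
    (p.2 = "store" ∧ ∃ s ∈ pvStoreA, s.toList = p.1) := by decide

-- the exact-phase membership lists are all among the dict keys
theorem pvLists_sub_keys :
    (∀ s ∈ pvVideoA, s ∈ pvExactB.keys) ∧ (∀ s ∈ pvSocialA, s ∈ pvExactB.keys) ∧
    (∀ s ∈ pvRepoA, s ∈ pvExactB.keys) ∧ (∀ s ∈ pvStoreA, s ∈ pvExactB.keys) ∧
    (∀ s ∈ pvArticleA, s ∈ pvExactB.keys) := by decide

-- ===== VERDICT (by name: the statement is the Claim_ definition above) =====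
theorem classify_type_spec : Claim_equal_classify_type := by
  intro d _
  unfold Spec_classify_type classify_type_alt
  cases hg : pvExactB.get? d with
  | some cat =>
    exact pvA_on_keys (d, cat) (PySem.Dict.mem_items_of_get?_eq_some _ hg)
  | none =>
    -- exact phase: d is none of the keys, so all five membership tests fail
    have hnk : d ∉ pvExactB.keys := (PySem.Dict.get?_eq_none_iff_not_mem_keys _ _).mp hg
    have hv : pvVideoA.contains d = false := by
      by_contra h
      exact hnk (pvLists_sub_keys.1 d (List.contains_iff_mem.mp (by simpa using h)))
    have hs : pvSocialA.contains d = false := by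
      by_contra h
      exact hnk (pvLists_sub_keys.2.1 d (List.contains_iff_mem.mp (by simpa using h)))
    have hr : pvRepoA.contains d = false := by
      by_contra h
      exact hnk (pvLists_sub_keys.2.2.1 d (List.contains_iff_mem.mp (by simpa using h)))
    have hst : pvStoreA.contains d = false := by
      by_contra h
      exact hnk (pvLists_sub_keys.2.2.2.1 d (List.contains_iff_mem.mp (by simpa using h)))
    have har : pvArticleA.contains d = false := by
      by_contra h
      exact hnk (pvLists_sub_keys.2.2.2.2 d (List.contains_iff_mem.mp (by simpa using h)))
    unfold classify_type
    rw [hv, hs, hr, hst, har]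
    simp only [Bool.false_eq_true, if_false]
    by_cases hx : ∃ r c, '.' :: r <:+ d.toList ∧ pvSuffixB.get? r = some c
    · obtain ⟨r, c, hsuf, hk⟩ := hx
      rw [pvPeel_some d.toList r c hsuf hk]
      have hitems : (r, c) ∈ pvSuffixB.items :=
        PySem.Dict.mem_items_of_get?_eq_some _ hk
      have hfalse : ∀ cats keyed, (∀ s ∈ cats, pvSuffixB.get? s.toList = some keyed) →
          keyed ≠ c → pvEndsAny d cats = false := by
        intro cats keyed hkd hne
        by_contra h
        obtain ⟨s', hs'm, hs'e⟩ := (pvEndsAny_iff d cats).mp (by simpa using h)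
        exact hne (pvUniq hs'e hsuf (hkd s' hs'm) hk).2
      rcases pvSuffix_cases (r, c) hitems with ⟨hc, s, hsm, hst'⟩ | ⟨hc, s, hsm, hst'⟩ | ⟨hc, s, hsm, hst'⟩ | ⟨hc, s, hsm, hst'⟩ <;> simp only at hc hst' <;> subst hc
      · rw [(pvEndsAny_iff d pvVideoA).mpr ⟨s, hsm, hst' ▸ hsuf⟩]
        simp
      · rw [hfalse pvVideoA "video" pvVideo_keyed (by decide),
            (pvEndsAny_iff d pvSocialA).mpr ⟨s, hsm, hst' ▸ hsuf⟩]
        simp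
      · rw [hfalse pvVideoA "video" pvVideo_keyed (by decide),
            hfalse pvSocialA "social" pvSocial_keyed (by decide),
            (pvEndsAny_iff d pvRepoA).mpr ⟨s, hsm, hst' ▸ hsuf⟩]
        simp
      · rw [hfalse pvVideoA "video" pvVideo_keyed (by decide),
            hfalse pvSocialA "social" pvSocial_keyed (by decide),
            hfalse pvRepoA "repository" pvRepo_keyed (by decide),
            (pvEndsAny_iff d pvStoreA).mpr ⟨s, hsm, hst' ▸ hsuf⟩]
        simp
    · push Not at hx
      rw [pvPeel_none d.toList (fun r c hs => hx r c hs)]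
      have hnone : ∀ cats keyed, (∀ s ∈ cats, pvSuffixB.get? s.toList = some keyed) →
          pvEndsAny d cats = false := by
        intro cats keyed hkd
        by_contra h
        obtain ⟨s', hs'm, hs'e⟩ := (pvEndsAny_iff d cats).mp (by simpa using h)
        exact hx s'.toList keyed hs'e (hkd s' hs'm)
      rw [hnone pvVideoA "video" pvVideo_keyed, hnone pvSocialA "social" pvSocial_keyed,
          hnone pvRepoA "repository" pvRepo_keyed, hnone pvStoreA "store" pvStore_keyed]
      simp
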